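-- pv_equiv track=rewrite | github.com/pdGruby/cloupy | diagrams.py | distinguish_between_wet_and_dry
-- ===== SOURCE A (Python) =====
-- def distinguish_between_wet_and_dry(temperature, precipitation):
--     corrected_precipitation = []
--     for preci in precipitation:
--         if preci < 100:
--             corrected_precipitation.append(preci / 2)
--         else:
--             corrected_precipitation.append(preci)
--
--     dry_months_indexes = []
--     wet_months_indexes = []
--
--     for index, preci in enumerate(corrected_precipitation):
--         if preci > temperature[index]:
--             wet_months_indexes.append(index)
--         else:
--             dry_months_indexes.append(index)
--
--     wet_periods = []
--     period = []
--     for i, index in enumerate(wet_months_indexes):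
--         if i == 0:
--             period.append(index)
--         elif index - wet_months_indexes[i - 1] != 1:
--             period.append(wet_months_indexes[i - 1])
--             wet_periods.append((period[0], period[1]))
--             period.clear()
--
--             period.append(index)
--         else:
--             continue
--     if len(period) == 1:
--         wet_period_starts_with = period[0]
--         wet_period_ends_with = wet_months_indexes[-1]
--         wet_periods.append((wet_period_starts_with, wet_period_ends_with))
--
--     dry_periods = []
--     period = []
--     for i, index in enumerate(dry_months_indexes):
--         if i == 0:
--             period.append(index)
--         elif index - dry_months_indexes[i - 1] != 1:
--             period.append(dry_months_indexes[i - 1])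
--             dry_periods.append((period[0], period[1]))
--             period.clear()
--
--             period.append(index)
--         else:
--             continue
--     try:
--         if len(period) == 1:
--             dry_period_starts_with = period[0]
--             dry_period_ends_with = dry_months_indexes[-1]
--             dry_periods.append((dry_period_starts_with, dry_period_ends_with))
--     except KeyError:
--         pass
--
--     return wet_periods, dry_periods
-- ===== SOURCE B (Python) =====
-- def distinguish_between_wet_and_dry(temperature, precipitation):
--     # Single pass: a run-transition state machine over corrected precipitation vs temperature.
--     wet_periods = []
--     dry_periods = []
--     run_start = 0
--     cur = None
--     for i, preci in enumerate(precipitation):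
--         corrected = preci / 2 if preci < 100 else preci
--         label = corrected > temperature[i]
--         if cur is None:
--             cur = label
--         elif label != cur:
--             (wet_periods if cur else dry_periods).append((run_start, i - 1))
--             run_start = i
--             cur = label
--     if cur is not None:
--         (wet_periods if cur else dry_periods).append((run_start, len(precipitation) - 1))
--     return wet_periods, dry_periods
-- ===== Notes on version B (the rewrite author's own statement) =====
-- stated objective: simpler
-- what changed: Replaces A's four passes (correction list, classification into wet/dry index lists, then two gap-scanning grouping loops over those lists) with one single-pass run-transition state machine that closes a (start, end) period whenever the wet/dry label flips.
import Mathlib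
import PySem

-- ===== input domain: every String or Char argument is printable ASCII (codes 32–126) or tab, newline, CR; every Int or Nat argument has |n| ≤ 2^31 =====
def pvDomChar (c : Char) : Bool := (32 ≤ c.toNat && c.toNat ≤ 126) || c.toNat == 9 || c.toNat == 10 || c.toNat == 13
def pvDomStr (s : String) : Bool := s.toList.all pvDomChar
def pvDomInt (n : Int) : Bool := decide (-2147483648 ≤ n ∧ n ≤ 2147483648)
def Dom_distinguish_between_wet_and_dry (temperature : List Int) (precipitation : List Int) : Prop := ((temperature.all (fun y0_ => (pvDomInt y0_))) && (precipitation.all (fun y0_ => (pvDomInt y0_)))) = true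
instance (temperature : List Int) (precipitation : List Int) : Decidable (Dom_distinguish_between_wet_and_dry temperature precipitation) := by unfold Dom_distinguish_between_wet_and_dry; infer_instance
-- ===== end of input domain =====

-- B re-implements the grouping as a single-pass run-transition state machine (one loop instead of
-- a correction pass, a classification pass and two gap-scanning passes over index lists); same result.
-- Float note (both ports): Python stores preci/2 as a float; for |preci| ≤ 2^31 this is exact, and the
-- only use is the comparison preci/2 > t, which is equivalent to preci > 2*t over the integers.
-- Both ports therefore keep the DOUBLED corrected value (preci if preci < 100, else 2*preci) and
-- compare it with 2*t: exact on the stated domain.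

-- ===== PORT A =====
-- 'for preci in precipitation: corrected_precipitation.append(...)' (doubled representation, see note)
def pvA_corr (acc : List Int) : List Int → List Int
  | [] => acc
  | p :: rest => pvA_corr (acc ++ [if p < 100 then p else 2 * p]) rest

-- 'for index, preci in enumerate(corrected_precipitation): ...' ; temperature[index] is
-- PySem.List.pyGet? (none = IndexError, excluded by Pre_; .getD 0 totalises the port)
def pvA_classify (T : List Int) (i : Nat) (wet dry : List Int) : List Int → List Int × List Int
  | [] => (wet, dry)
  | c :: rest =>
    if 2 * ((PySem.List.pyGet? T (Int.ofNat i)).getD 0) < c then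
      pvA_classify T (i + 1) (wet ++ [(i : Int)]) dry rest
    else
      pvA_classify T (i + 1) wet (dry ++ [(i : Int)]) rest

-- the run-grouping loop 'for i, index in enumerate(idxs): ...' with state (periods, period)
def pvA_groupLoop (idxs : List Int) (i : Nat) (periods : List (Int × Int)) (period : List Int) :
    List Int → List (Int × Int) × List Int
  | [] => (periods, period)
  | index :: rest =>
    if i = 0 then
      pvA_groupLoop idxs (i + 1) periods (period ++ [index]) rest
    else if index - (PySem.List.pyGet? idxs ((i : Int) - 1)).getD 0 ≠ 1 then
      let period2 := period ++ [(PySem.List.pyGet? idxs ((i : Int) - 1)).getD 0]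
      pvA_groupLoop idxs (i + 1)
        (periods ++ [((PySem.List.pyGet? period2 0).getD 0, (PySem.List.pyGet? period2 1).getD 0)])
        [index] rest
    else
      pvA_groupLoop idxs (i + 1) periods period rest

-- the trailing 'if len(period) == 1: ... append((period[0], idxs[-1]))'
def pvA_close (idxs : List Int) (r : List (Int × Int) × List Int) : List (Int × Int) :=
  if r.2.length = 1 then
    r.1 ++ [((PySem.List.pyGet? r.2 0).getD 0, (PySem.List.pyGet? idxs (-1)).getD 0)]
  else r.1

def pvA_group (idxs : List Int) : List (Int × Int) :=
  pvA_close idxs (pvA_groupLoop idxs 0 [] [] idxs)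

def distinguish_between_wet_and_dry (temperature : List Int) (precipitation : List Int) :
    (List (Int × Int)) × (List (Int × Int)) :=
  let wd := pvA_classify temperature 0 [] [] (pvA_corr [] precipitation)
  (pvA_group wd.1, pvA_group wd.2)

-- ===== PORT B =====
-- Source B's single loop: state (wet_periods, dry_periods, run_start, cur)
def pvB_loop (T : List Int) (i : Nat) (wet dry : List (Int × Int)) (start : Int) (cur : Option Bool) :
    List Int → List (Int × Int) × List (Int × Int) × Int × Option Bool
  | [] => (wet, dry, start, cur)
  | p :: rest =>
    let label : Bool := decide (2 * ((PySem.List.pyGet? T (Int.ofNat i)).getD 0) < (if p < 100 then p else 2 * p))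
    match cur with
    | none => pvB_loop T (i + 1) wet dry start (some label) rest
    | some c =>
      if label ≠ c then
        if c then pvB_loop T (i + 1) (wet ++ [(start, (i : Int) - 1)]) dry (i : Int) (some label) rest
        else pvB_loop T (i + 1) wet (dry ++ [(start, (i : Int) - 1)]) (i : Int) (some label) rest
      else pvB_loop T (i + 1) wet dry start cur rest

-- Source B's trailing 'if cur is not None: ... append((run_start, len(precipitation) - 1))'
def pvB_fin (n : Nat) (r : List (Int × Int) × List (Int × Int) × Int × Option Bool) :
    List (Int × Int) × List (Int × Int) :=
  match r.2.2.2 with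
  | none => (r.1, r.2.1)
  | some c =>
    if c then (r.1 ++ [(r.2.2.1, (n : Int) - 1)], r.2.1)
    else (r.1, r.2.1 ++ [(r.2.2.1, (n : Int) - 1)])

def distinguish_between_wet_and_dry_alt (temperature : List Int) (precipitation : List Int) :
    (List (Int × Int)) × (List (Int × Int)) :=
  pvB_fin precipitation.length (pvB_loop temperature 0 [] [] 0 none precipitation)

-- ===== PRECONDITION & SPEC =====
-- Pre_ excludes exactly the inputs where Python A raises IndexError (temperature[index] with
-- index ≥ len(temperature)); B raises there too.
def Pre_distinguish_between_wet_and_dry (temperature : List Int) (precipitation : List Int) : Prop :=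
  precipitation.length ≤ temperature.length
instance (temperature : List Int) (precipitation : List Int) : Decidable (Pre_distinguish_between_wet_and_dry temperature precipitation) := by unfold Pre_distinguish_between_wet_and_dry; infer_instance
def pvWitness_distinguish_between_wet_and_dry : List Int × List Int := ([10, 20], [5, 200])

def Spec_distinguish_between_wet_and_dry (temperature : List Int) (precipitation : List Int) (out : (List (Int × Int)) × (List (Int × Int))) : Prop := out = distinguish_between_wet_and_dry_alt temperature precipitation
instance (temperature : List Int) (precipitation : List Int) (out : (List (Int × Int)) × (List (Int × Int))) : Decidable (Spec_distinguish_between_wet_and_dry temperature precipitation out) := by unfold Spec_distinguish_between_wet_and_dry; infer_instance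

-- ===== CLAIM (what is proved, stated in full; the proofs are below) =====
def Claim_equal_distinguish_between_wet_and_dry : Prop := ∀ (temperature : List Int) (precipitation : List Int), Dom_distinguish_between_wet_and_dry temperature precipitation → Pre_distinguish_between_wet_and_dry temperature precipitation → Spec_distinguish_between_wet_and_dry temperature precipitation (distinguish_between_wet_and_dry temperature precipitation)

-- ===== LEMMAS AND PROOFS =====

-- the wet/dry label of month i (doubled representation)
def pvLab (T : List Int) (i : Nat) (p : Int) : Bool :=
  decide (2 * ((PySem.List.pyGet? T (Int.ofNat i)).getD 0) < (if p < 100 then p else 2 * p))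

-- indices (from absolute position i) of wet / dry months of a precipitation suffix
def pvWIdx (T : List Int) (i : Nat) : List Int → List Int
  | [] => []
  | p :: rest => if pvLab T i p then (i : Int) :: pvWIdx T (i + 1) rest else pvWIdx T (i + 1) rest

def pvDIdx (T : List Int) (i : Nat) : List Int → List Int
  | [] => []
  | p :: rest => if pvLab T i p then pvDIdx T (i + 1) rest else (i : Int) :: pvDIdx T (i + 1) rest

-- reference grouping: close runs at gaps
def pvGaux (start prev : Int) : List Int → List (Int × Int)
  | [] => [(start, prev)]
  | x :: l => if x - prev = 1 then pvGaux start x l else (start, prev) :: pvGaux x x l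

def pvGspec : List Int → List (Int × Int)
  | [] => []
  | a :: l => pvGaux a a l

-- reference form of B's state machine (builds the output back-to-front)
def pvBR (T : List Int) (i : Nat) (start : Int) (c : Bool) :
    List Int → List (Int × Int) × List (Int × Int)
  | [] => if c then ([(start, (i : Int) - 1)], []) else ([], [(start, (i : Int) - 1)])
  | p :: rest =>
    if pvLab T i p = c then pvBR T (i + 1) start c rest
    else
      let r := pvBR T (i + 1) (i : Int) (pvLab T i p) rest
      if c then ((start, (i : Int) - 1) :: r.1, r.2) else (r.1, (start, (i : Int) - 1) :: r.2)

theorem pvA_corr_eq (ps : List Int) (acc : List Int) :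
    pvA_corr acc ps = acc ++ ps.map (fun p => if p < 100 then p else 2 * p) := by
  induction ps generalizing acc with
  | nil => simp [pvA_corr]
  | cons p rest ih => simp [pvA_corr, ih]

theorem pvA_classify_eq (T : List Int) (ps : List Int) (i : Nat) (wet dry : List Int) :
    pvA_classify T i wet dry (ps.map (fun p => if p < 100 then p else 2 * p)) =
      (wet ++ pvWIdx T i ps, dry ++ pvDIdx T i ps) := by
  induction ps generalizing i wet dry with
  | nil => simp [pvA_classify, pvWIdx, pvDIdx]
  | cons p rest ih =>
    by_cases h : pvLab T i p
    · have h' := of_decide_eq_true h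
      simp at h'
      simp [pvA_classify, pvWIdx, pvDIdx, h, h', ih]
    · have h' := of_decide_eq_false (Bool.of_not_eq_true h)
      simp at h'
      simp [pvA_classify, pvWIdx, pvDIdx, h, h', ih]

theorem pvWIdx_lb (T : List Int) (ps : List Int) (i : Nat) :
    ∀ x ∈ pvWIdx T i ps, (i : Int) ≤ x := by
  induction ps generalizing i with
  | nil => simp [pvWIdx]
  | cons p rest ih =>
    intro x hx
    by_cases h : pvLab T i p
    · simp [pvWIdx, h] at hx
      rcases hx with rfl | hx
      · exact le_refl _
      · have := ih (i + 1) x hx; push_cast at this ⊢; omega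
    · simp [pvWIdx, h] at hx
      have := ih (i + 1) x hx; push_cast at this ⊢; omega

theorem pvDIdx_lb (T : List Int) (ps : List Int) (i : Nat) :
    ∀ x ∈ pvDIdx T i ps, (i : Int) ≤ x := by
  induction ps generalizing i with
  | nil => simp [pvDIdx]
  | cons p rest ih =>
    intro x hx
    by_cases h : pvLab T i p
    · simp [pvDIdx, h] at hx
      have := ih (i + 1) x hx; push_cast at this ⊢; omega
    · simp [pvDIdx, h] at hx
      rcases hx with rfl | hx
      · exact le_refl _
      · have := ih (i + 1) x hx; push_cast at this ⊢; omega

theorem pvGaux_close (l : List Int) (start prev : Int) (h : ∀ x ∈ l, prev + 2 ≤ x) :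
    pvGaux start prev l = (start, prev) :: pvGspec l := by
  cases l with
  | nil => simp [pvGaux, pvGspec]
  | cons x rest =>
    have hx : prev + 2 ≤ x := h x (List.mem_cons_self ..)
    have : ¬ (x - prev = 1) := by omega
    simp [pvGaux, pvGspec, this]

theorem pv_getLast?_of_drop (l : List Int) (n : Nat) (x : Int) (xs : List Int)
    (h : l.drop n = x :: xs) : l.getLast? = (x :: xs).getLast? := by
  conv_lhs => rw [← List.take_append_drop n l, h]
  simp
  exact Option.or_of_isSome (by simp)

theorem pvA_groupLoop_eq (idxs : List Int) (rest : List Int) (i : Nat) (periods : List (Int × Int))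
    (start prev : Int) (hi : 1 ≤ i) (hd : idxs.drop (i - 1) = prev :: rest) :
    pvA_close idxs (pvA_groupLoop idxs i periods [start] rest) = periods ++ pvGaux start prev rest := by
  induction rest generalizing i periods start prev with
  | nil =>
    have hlast : idxs.getLast? = some prev := by
      rw [pv_getLast?_of_drop idxs (i - 1) prev [] hd]; rfl
    simp [pvA_groupLoop, pvA_close, pvGaux, pysem, hlast]
  | cons x rest' ih =>
    have hi0 : i ≠ 0 := by omega
    have hget : PySem.List.pyGet? idxs ((i : Int) - 1) = some prev := by
      have h1 : ((i : Int) - 1) = ((i - 1 : Nat) : Int) := by omega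
      rw [h1, PySem.List.pyGet?_natCast, ← List.head?_drop, hd]; rfl
    have hd' : idxs.drop i = x :: rest' := by
      have h3 := congrArg (List.drop 1) hd
      simpa [List.drop_drop, show i - 1 + 1 = i from by omega,
        show 1 + (i - 1) = i from by omega] using h3
    have hd'' : idxs.drop ((i + 1) - 1) = x :: rest' := by simpa using hd'
    by_cases hgap : x - prev = 1
    · have step : pvA_groupLoop idxs i periods [start] (x :: rest') =
          pvA_groupLoop idxs (i + 1) periods [start] rest' := by
        simp [pvA_groupLoop, hi0, hget, hgap]
      rw [step, ih (i + 1) periods start x (by omega) hd'']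
      simp [pvGaux, hgap]
    · have step : pvA_groupLoop idxs i periods [start] (x :: rest') =
          pvA_groupLoop idxs (i + 1) (periods ++ [(start, prev)]) [x] rest' := by
        simp [pvA_groupLoop, hi0, hget, hgap]
      rw [step, ih (i + 1) (periods ++ [(start, prev)]) x x (by omega) hd'']
      simp [pvGaux, hgap]

theorem pvA_group_eq (idxs : List Int) : pvA_group idxs = pvGspec idxs := by
  cases idxs with
  | nil => simp [pvA_group, pvA_groupLoop, pvA_close, pvGspec]
  | cons a l =>
    have step : pvA_groupLoop (a :: l) 0 [] [] (a :: l) =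
        pvA_groupLoop (a :: l) 1 [] [a] l := by
      simp [pvA_groupLoop]
    rw [pvA_group, step, pvA_groupLoop_eq (a :: l) l 1 [] a a (by omega) (by rfl)]
    simp [pvGspec]

theorem pvB_loop_eq (T : List Int) (rest : List Int) (i : Nat) (wet dry : List (Int × Int))
    (start : Int) (c : Bool) (n : Nat) (hn : i + rest.length = n) :
    pvB_fin n (pvB_loop T i wet dry start (some c) rest) =
      (wet ++ (pvBR T i start c rest).1, dry ++ (pvBR T i start c rest).2) := by
  induction rest generalizing i wet dry start c with
  | nil =>
    have hn0 : i = n := by simpa using hn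
    subst hn0
    cases c <;> simp [pvB_loop, pvB_fin, pvBR]
  | cons p rest' ih =>
    have hn' : (i + 1) + rest'.length = n := by simp at hn; omega
    by_cases hl : pvLab T i p = c
    · have step : pvB_loop T i wet dry start (some c) (p :: rest') =
          pvB_loop T (i + 1) wet dry start (some c) rest' := by
        simp only [pvB_loop]
        rw [show (decide (2 * ((PySem.List.pyGet? T (Int.ofNat i)).getD 0) <
            (if p < 100 then p else 2 * p))) = pvLab T i p from rfl, hl]
        simp
      rw [step, ih (i + 1) wet dry start c hn']
      simp [pvBR, hl]
    · cases c with
      | true =>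
        have step : pvB_loop T i wet dry start (some true) (p :: rest') =
            pvB_loop T (i + 1) (wet ++ [(start, (i : Int) - 1)]) dry (i : Int) (some (pvLab T i p)) rest' := by
          simp only [pvB_loop]
          rw [show (decide (2 * ((PySem.List.pyGet? T (Int.ofNat i)).getD 0) <
              (if p < 100 then p else 2 * p))) = pvLab T i p from rfl]
          simp [hl]
        rw [step, ih (i + 1) _ _ _ _ hn']
        simp [pvBR, hl]
      | false =>
        have step : pvB_loop T i wet dry start (some false) (p :: rest') =
            pvB_loop T (i + 1) wet (dry ++ [(start, (i : Int) - 1)]) (i : Int) (some (pvLab T i p)) rest' := by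
          simp only [pvB_loop]
          rw [show (decide (2 * ((PySem.List.pyGet? T (Int.ofNat i)).getD 0) <
              (if p < 100 then p else 2 * p))) = pvLab T i p from rfl]
          simp [hl]
        rw [step, ih (i + 1) _ _ _ _ hn']
        simp [pvBR, hl]

theorem pvBR_eq (T : List Int) (ps : List Int) (i : Nat) (start : Int) (c : Bool) :
    pvBR T i start c ps =
      ((if c then pvGaux start ((i : Int) - 1) (pvWIdx T i ps) else pvGspec (pvWIdx T i ps)),
       (if c then pvGspec (pvDIdx T i ps) else pvGaux start ((i : Int) - 1) (pvDIdx T i ps))) := by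
  induction ps generalizing i start c with
  | nil => cases c <;> simp [pvBR, pvWIdx, pvDIdx, pvGaux, pvGspec]
  | cons p rest ih =>
    by_cases hl : pvLab T i p
    · cases c with
      | true =>
        have hcons : (i : Int) - ((i : Int) - 1) = 1 := by omega
        simp [pvBR, pvWIdx, pvDIdx, pvGaux, hl, ih (i + 1), hcons]
      | false =>
        have hcl : pvGaux start ((i : Int) - 1) (pvDIdx T (i + 1) rest) =
            (start, (i : Int) - 1) :: pvGspec (pvDIdx T (i + 1) rest) := by
          apply pvGaux_close
          intro x hx
          have := pvDIdx_lb T rest (i + 1) x hx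
          push_cast at this ⊢; omega
        simp [pvBR, pvWIdx, pvDIdx, pvGspec, hl, ih (i + 1), hcl]
    · cases c with
      | true =>
        have hcl : pvGaux start ((i : Int) - 1) (pvWIdx T (i + 1) rest) =
            (start, (i : Int) - 1) :: pvGspec (pvWIdx T (i + 1) rest) := by
          apply pvGaux_close
          intro x hx
          have := pvWIdx_lb T rest (i + 1) x hx
          push_cast at this ⊢; omega
        simp [pvBR, pvWIdx, pvDIdx, pvGspec, hl, ih (i + 1), hcl]
      | false =>
        have hcons : (i : Int) - ((i : Int) - 1) = 1 := by omega
        simp [pvBR, pvWIdx, pvDIdx, pvGaux, hl, ih (i + 1), hcons]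

theorem pv_main (T P : List Int) :
    distinguish_between_wet_and_dry T P = distinguish_between_wet_and_dry_alt T P := by
  cases P with
  | nil =>
    simp [distinguish_between_wet_and_dry, distinguish_between_wet_and_dry_alt,
      pvA_corr, pvA_classify, pvA_group, pvA_groupLoop, pvA_close, pvB_loop, pvB_fin]
  | cons p rest =>
    have hA : distinguish_between_wet_and_dry T (p :: rest) =
        (pvGspec (pvWIdx T 0 (p :: rest)), pvGspec (pvDIdx T 0 (p :: rest))) := by
      rw [distinguish_between_wet_and_dry, pvA_corr_eq, List.nil_append,
        pvA_classify_eq T (p :: rest) 0 [] []]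
      simp [pvA_group_eq]
    have hstep : pvB_loop T 0 [] [] 0 none (p :: rest) =
        pvB_loop T 1 [] [] 0 (some (pvLab T 0 p)) rest := by
      simp only [pvB_loop]; rfl
    have hB : distinguish_between_wet_and_dry_alt T (p :: rest) =
        ((pvBR T 1 0 (pvLab T 0 p) rest).1, (pvBR T 1 0 (pvLab T 0 p) rest).2) := by
      rw [distinguish_between_wet_and_dry_alt, hstep,
        pvB_loop_eq T rest 1 [] [] 0 (pvLab T 0 p) (p :: rest).length (by simp; omega)]
      simp
    rw [hA, hB, pvBR_eq]
    by_cases hl : pvLab T 0 p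
    · simp [pvWIdx, pvDIdx, pvGspec, hl]
    · simp [pvWIdx, pvDIdx, pvGspec, hl]

-- ===== VERDICT (by name: the statement is the Claim_ definition above) =====
theorem distinguish_between_wet_and_dry_spec : Claim_equal_distinguish_between_wet_and_dry := by
  intro T P _ _
  unfold Spec_distinguish_between_wet_and_dry
  exact pv_main T P
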